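-- pv_equiv track=rewrite | github.com/Sabarudin4433/duphunter | duphunter/near_dup_search.py | _normalize_ignore_specs
-- ===== SOURCE A (Python) =====
-- def _normalize_ignore_specs(raw_specs: list[str]) -> list[str]:
--     specs: list[str] = []
--     for raw in raw_specs:
--         for part in str(raw).split(","):
--             item = part.strip()
--             if item:
--                 specs.append(item)
--     return specs
-- ===== SOURCE B (Python) =====
-- def _normalize_ignore_specs(raw_specs: list[str]) -> list[str]:
--     # Join everything into one string, then do a single flat split/strip/filter pass.
--     joined = ",".join(str(raw) for raw in raw_specs)
--     return [item for item in (part.strip() for part in joined.split(",")) if item]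
-- ===== Notes on version B (the rewrite author's own statement) =====
-- stated objective: alternative
-- what changed: B replaces A's nested per-element loop by joining all inputs into one comma-separated string and doing a single flat split/strip/filter pass; empty fragments introduced by the join are dropped by the same non-empty filter.
import Mathlib
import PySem

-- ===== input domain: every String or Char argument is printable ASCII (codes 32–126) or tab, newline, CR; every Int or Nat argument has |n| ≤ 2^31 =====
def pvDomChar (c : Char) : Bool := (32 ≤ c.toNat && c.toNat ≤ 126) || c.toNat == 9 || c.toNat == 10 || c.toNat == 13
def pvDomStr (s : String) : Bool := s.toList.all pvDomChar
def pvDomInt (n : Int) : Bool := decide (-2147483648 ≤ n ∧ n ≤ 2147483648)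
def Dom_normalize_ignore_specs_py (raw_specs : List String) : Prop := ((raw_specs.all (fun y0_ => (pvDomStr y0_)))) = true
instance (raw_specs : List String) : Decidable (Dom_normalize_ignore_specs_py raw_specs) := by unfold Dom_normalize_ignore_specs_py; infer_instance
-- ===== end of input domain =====

-- B joins all inputs into one comma-separated string and performs a single flat
-- split/strip/filter pass instead of A's nested per-element loop (alternative decomposition).


-- ===== PORT A =====
-- str(raw) is the identity on str inputs, so it is not ported.
def normalize_ignore_specs_py (raw_specs : List String) : List String :=
  raw_specs.foldl
    (fun specs raw =>
      (PySem.Chars.splitOn raw.toList [',']).foldl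
        (fun specs part =>
          let item := PySem.Chars.strip part
          if item ≠ [] then specs ++ [String.ofList item] else specs)
        specs)
    []

-- ===== PORT B =====
def normalize_ignore_specs_py_alt (raw_specs : List String) : List String :=
  ((((PySem.Chars.splitOn (PySem.Chars.join [','] (raw_specs.map String.toList)) [',']).map
      PySem.Chars.strip).filter
      (fun item => item != [])).map String.ofList)

-- ===== PRECONDITION & SPEC =====
def Spec_normalize_ignore_specs_py (raw_specs : List String) (out : List String) : Prop := out = normalize_ignore_specs_py_alt raw_specs
instance (raw_specs : List String) (out : List String) : Decidable (Spec_normalize_ignore_specs_py raw_specs out) := by unfold Spec_normalize_ignore_specs_py; infer_instance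

-- ===== CLAIM (what is proved, stated in full; the proofs are below) =====
def Claim_equal_normalize_ignore_specs_py : Prop := ∀ (raw_specs : List String), Dom_normalize_ignore_specs_py raw_specs → Spec_normalize_ignore_specs_py raw_specs (normalize_ignore_specs_py raw_specs)

-- ===== LEMMAS AND PROOFS =====

-- Simple structural characterisation of splitting on a single comma.
def consHead (p : List Char) : List (List Char) → List (List Char)
  | [] => [p]
  | h :: t => (p ++ h) :: t

def mySplit : List Char → List (List Char)
  | [] => [[]]
  | c :: rest => if c = ',' then [] :: mySplit rest else consHead [c] (mySplit rest)

lemma mySplit_ne_nil (l : List Char) : mySplit l ≠ [] := by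
  cases l with
  | nil => simp [mySplit]
  | cons c rest =>
    simp only [mySplit]
    split
    · simp
    · cases h : mySplit rest <;> simp [consHead]

lemma consHead_nil_of_ne (l : List (List Char)) (h : l ≠ []) : consHead [] l = l := by
  cases l with
  | nil => exact absurd rfl h
  | cons a t => simp [consHead]

lemma consHead_consHead (p q : List Char) (l : List (List Char)) :
    consHead p (consHead q l) = consHead (p ++ q) l := by
  cases l <;> simp [consHead]

lemma consHead_append (p : List Char) (l m : List (List Char)) (h : l ≠ []) :
    consHead p (l ++ m) = consHead p l ++ m := by
  cases l with
  | nil => exact absurd rfl h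
  | cons a t => simp [consHead]

lemma go_eq (l : List Char) : ∀ (fuel : Nat) (cur : List Char) (acc : List (List Char)),
    l.length ≤ fuel →
    PySem.Chars.splitOn.go [','] fuel l cur acc
      = acc.reverse ++ consHead cur.reverse (mySplit l) := by
  induction l with
  | nil =>
    intro fuel cur acc _
    cases fuel <;> simp [PySem.Chars.splitOn.go, mySplit, consHead]
  | cons c rest ih =>
    intro fuel cur acc h
    cases fuel with
    | zero => simp at h
    | succ f =>
      have hf : rest.length ≤ f := by simpa using h
      by_cases hc : c = ','
      · subst hc
        rw [show PySem.Chars.splitOn.go [','] (f+1) (',' :: rest) cur acc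
              = PySem.Chars.splitOn.go [','] f rest [] (cur.reverse :: acc) by
            simp [PySem.Chars.splitOn.go, List.isPrefixOf]]
        rw [ih f [] (cur.reverse :: acc) hf]
        simp only [mySplit, List.reverse_cons, List.append_assoc,
          List.reverse_nil, consHead_nil_of_ne _ (mySplit_ne_nil rest)]
        simp [consHead]
      · rw [show PySem.Chars.splitOn.go [','] (f+1) (c :: rest) cur acc
              = PySem.Chars.splitOn.go [','] f rest (c :: cur) acc by
            simp [PySem.Chars.splitOn.go, List.isPrefixOf, (Ne.symm hc)]]
        rw [ih f (c :: cur) acc hf]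
        simp [mySplit, hc, consHead_consHead]

lemma splitOn_comma (cs : List Char) : PySem.Chars.splitOn cs [','] = mySplit cs := by
  unfold PySem.Chars.splitOn
  rw [go_eq cs (cs.length + 1) [] [] (by omega)]
  simp [consHead_nil_of_ne _ (mySplit_ne_nil cs)]

lemma mySplit_append (a b : List Char) :
    mySplit (a ++ ',' :: b) = mySplit a ++ mySplit b := by
  induction a with
  | nil => simp [mySplit]
  | cons c a' ih =>
    by_cases hc : c = ','
    · subst hc; simp [mySplit, ih]
    · simp only [List.cons_append, mySplit, if_neg hc, ih]
      rw [consHead_append _ _ _ (mySplit_ne_nil a')]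

lemma mySplit_join (x : String) (xs : List String) :
    mySplit (PySem.Chars.join [','] ((x :: xs).map String.toList))
      = (x :: xs).flatMap (fun s => mySplit s.toList) := by
  induction xs generalizing x with
  | nil => simp [PySem.Chars.join, List.intercalate]
  | cons y ys ih =>
    have hjoin : PySem.Chars.join [','] ((x :: y :: ys).map String.toList)
        = x.toList ++ ',' :: PySem.Chars.join [','] ((y :: ys).map String.toList) := by
      simp [PySem.Chars.join, List.intercalate]
    rw [hjoin, mySplit_append, ih y]
    simp

-- A's inner loop, rewritten to the shape of PySem.List.foldl_append_if.
lemma inner_eq (parts : List (List Char)) (specs : List String) :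
    parts.foldl
      (fun specs part =>
        let item := PySem.Chars.strip part
        if item ≠ [] then specs ++ [String.ofList item] else specs)
      specs
    = specs ++ (parts.filter (fun part => PySem.Chars.strip part != [])).map
        (fun part => String.ofList (PySem.Chars.strip part)) := by
  have hfun : (fun (specs : List String) (part : List Char) =>
        let item := PySem.Chars.strip part
        if item ≠ [] then specs ++ [String.ofList item] else specs)
      = (fun specs part =>
        if (PySem.Chars.strip part != []) = true
        then specs ++ [String.ofList (PySem.Chars.strip part)] else specs) := by
    funext specs part
    simp [bne_iff_ne]
  rw [hfun, PySem.List.foldl_append_if]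

lemma a_eq_flatMap (raw_specs : List String) :
    normalize_ignore_specs_py raw_specs
      = raw_specs.flatMap (fun raw =>
          ((mySplit raw.toList).filter (fun part => PySem.Chars.strip part != [])).map
            (fun part => String.ofList (PySem.Chars.strip part))) := by
  unfold normalize_ignore_specs_py
  have : ∀ (l : List String) (acc : List String),
      l.foldl
        (fun specs raw =>
          (PySem.Chars.splitOn raw.toList [',']).foldl
            (fun specs part =>
              let item := PySem.Chars.strip part
              if item ≠ [] then specs ++ [String.ofList item] else specs)
            specs)
        acc
      = acc ++ l.flatMap (fun raw =>
          ((mySplit raw.toList).filter (fun part => PySem.Chars.strip part != [])).map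
            (fun part => String.ofList (PySem.Chars.strip part))) := by
    intro l
    induction l with
    | nil => simp
    | cons raw rest ih =>
      intro acc
      rw [List.foldl_cons, splitOn_comma raw.toList, inner_eq, ih, List.flatMap_cons]
      simp [List.append_assoc]
  simpa using this raw_specs []

lemma b_eq_flatMap (raw_specs : List String) :
    normalize_ignore_specs_py_alt raw_specs
      = ((mySplit (PySem.Chars.join [','] (raw_specs.map String.toList))).filter
          (fun part => PySem.Chars.strip part != [])).map
          (fun part => String.ofList (PySem.Chars.strip part)) := by
  unfold normalize_ignore_specs_py_alt
  rw [splitOn_comma, List.filter_map, List.map_map]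
  rfl

lemma map_filter_flatMap {α : Type} (f : List Char → String) (p : List Char → Bool)
    (g : α → List (List Char)) (l : List α) :
    ((l.flatMap g).filter p).map f = l.flatMap (fun x => ((g x).filter p).map f) := by
  induction l <;> simp [List.filter_append, *]

-- ===== VERDICT (by name: the statement is the Claim_ definition above) =====
theorem normalize_ignore_specs_py_spec : Claim_equal_normalize_ignore_specs_py := by
  unfold Claim_equal_normalize_ignore_specs_py
  intro raw_specs _
  unfold Spec_normalize_ignore_specs_py
  cases raw_specs with
  | nil => decide
  | cons x xs =>
    rw [a_eq_flatMap, b_eq_flatMap, mySplit_join, map_filter_flatMap]
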